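-- pv_equiv track=rewrite | github.com/JoshuaNgerng/SmartWasteAI | deap_VRP.py | findDayInSchedule
-- ===== SOURCE A (Python) =====
-- def findDayInSchedule(req: int, schedule: list[int]) -> int:
-- 	day = 1
-- 	for id in schedule:
-- 		if id == 0:
-- 			day += 1
-- 		if req == id:
-- 			return day
-- 	return 0
-- ===== SOURCE B (Python) =====
-- def findDayInSchedule(req: int, schedule: list[int]) -> int:
-- 	if req not in schedule:
-- 		return 0
-- 	i = schedule.index(req)
-- 	return 1 + schedule[:i + 1].count(0)
-- ===== Notes on version B (the rewrite author's own statement) =====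
-- stated objective: simpler
-- what changed: Replaces the stateful day-counter loop by locate-then-count: find the first occurrence of req and return 1 plus the number of zero-delimiters in the inclusive prefix.
import Mathlib
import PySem

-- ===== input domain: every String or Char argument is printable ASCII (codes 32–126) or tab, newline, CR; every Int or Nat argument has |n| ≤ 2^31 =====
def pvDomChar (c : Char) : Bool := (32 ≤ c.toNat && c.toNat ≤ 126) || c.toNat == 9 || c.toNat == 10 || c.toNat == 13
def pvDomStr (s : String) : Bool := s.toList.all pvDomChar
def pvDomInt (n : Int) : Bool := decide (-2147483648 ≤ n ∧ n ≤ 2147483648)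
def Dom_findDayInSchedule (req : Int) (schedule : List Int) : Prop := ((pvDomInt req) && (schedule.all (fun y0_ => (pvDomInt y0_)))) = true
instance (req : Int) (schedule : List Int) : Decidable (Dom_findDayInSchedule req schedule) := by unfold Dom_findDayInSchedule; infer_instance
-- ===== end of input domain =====

-- B replaces A's stateful day-counter loop by locate-then-count over the inclusive prefix (simpler decomposition; same cost).

-- ===== PORT A =====
-- A's loop: running day counter, incremented at each 0 before the equality test.
def findDayInScheduleGo (req : Int) (day : Int) : List Int → Int
  | [] => 0
  | id :: rest =>
      let day' := if id = 0 then day + 1 else day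
      if req = id then day' else findDayInScheduleGo req day' rest

def findDayInSchedule (req : Int) (schedule : List Int) : Int :=
  findDayInScheduleGo req 1 schedule

-- ===== PORT B =====
def findDayInSchedule_alt (req : Int) (schedule : List Int) : Int :=
  if req ∈ schedule then
    match PySem.List.index? schedule req with
    | some i => 1 + (PySem.List.count (PySem.List.slice schedule none (some ((i : Int) + 1))) 0 : Int)
    | none => 0
  else 0

-- ===== PRECONDITION & SPEC =====
def Spec_findDayInSchedule (req : Int) (schedule : List Int) (out : Int) : Prop := out = findDayInSchedule_alt req schedule
instance (req : Int) (schedule : List Int) (out : Int) : Decidable (Spec_findDayInSchedule req schedule out) := by unfold Spec_findDayInSchedule; infer_instance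

-- ===== CLAIM (what is proved, stated in full; the proofs are below) =====
def Claim_equal_findDayInSchedule : Prop := ∀ (req : Int) (schedule : List Int), Dom_findDayInSchedule req schedule → Spec_findDayInSchedule req schedule (findDayInSchedule req schedule)

-- ===== LEMMAS AND PROOFS =====

-- Characterisation of A's loop: if req occurs at first index i, the loop returns
-- day + (number of zeros in the inclusive prefix of length i+1); else 0.
theorem findDayInScheduleGo_eq (req day : Int) (s : List Int) :
    findDayInScheduleGo req day s =
      match PySem.List.index? s req with
      | some i => day + ((s.take (i + 1)).count 0 : Int)
      | none => 0 := by
  induction s generalizing day with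
  | nil => simp [findDayInScheduleGo, PySem.List.index?]
  | cons x rest ih =>
    by_cases hx : req = x
    · subst hx
      rw [PySem.List.index?_cons_self]
      by_cases h0 : req = 0 <;>
        simp [findDayInScheduleGo, h0]
    · rw [PySem.List.index?_cons_of_ne rest (Ne.symm hx)]
      have h := ih (if x = 0 then day + 1 else day)
      cases hidx : PySem.List.index? rest req with
      | none =>
        rw [hidx] at h
        simp only [Option.map_none]
        simpa [findDayInScheduleGo, hx] using h
      | some i =>
        rw [hidx] at h
        simp only [Option.map_some]
        simp only [findDayInScheduleGo, hx, h]
        by_cases h0 : x = 0 <;>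
          simp [h0, List.take_succ_cons] <;> ring

theorem findDayInSchedule_eq_alt (req : Int) (schedule : List Int) :
    findDayInSchedule req schedule = findDayInSchedule_alt req schedule := by
  unfold findDayInSchedule findDayInSchedule_alt
  rw [findDayInScheduleGo_eq]
  cases hidx : PySem.List.index? schedule req with
  | none =>
    have hmem : req ∉ schedule := (PySem.List.index?_eq_none_iff _ _).mp hidx
    simp [hmem]
  | some i =>
    have hmem : req ∈ schedule :=
      (PySem.List.index?_isSome_iff schedule req).mp (by rw [hidx]; rfl)
    have hslice : PySem.List.slice schedule none (some ((i : Int) + 1)) = schedule.take (i + 1) := by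
      have : ((i : Int) + 1) = ((i + 1 : Nat) : Int) := by push_cast; ring
      rw [this, PySem.List.slice_to_natCast]
    simp [hmem, hslice, PySem.List.count_eq]

-- ===== VERDICT (by name: the statement is the Claim_ definition above) =====
theorem findDayInSchedule_spec : Claim_equal_findDayInSchedule := by
  intro req schedule _
  unfold Spec_findDayInSchedule
  exact findDayInSchedule_eq_alt req schedule
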